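-- pv_equiv track=rewrite | github.com/eliottcassidy2000/math | 04-computation/selfcomp_posuniform_n7.py | is_vertex_transitive
-- ===== SOURCE A (Python) =====
-- def is_vertex_transitive(auts, n):
--     for v in range(1, n):
--         found = False
--         for perm in auts:
--             if perm[0] == v:
--                 found = True
--                 break
--         if not found:
--             return False
--     return True
-- ===== SOURCE B (Python) =====
-- def is_vertex_transitive(auts, n):
--     if n - 1 > len(auts):
--         # pigeonhole: each automorphism covers at most one vertex as perm[0]
--         return False
--     missing = set(range(1, n))
--     for perm in auts:
--         if not missing:
--             break
--         missing.discard(perm[0])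
--     return not missing
-- ===== Notes on version B (the rewrite author's own statement) =====
-- stated objective: alternative
-- what changed: Inverts the traversal: after a pigeonhole short-circuit (fewer automorphisms than vertices needed gives False), B makes a single pass over auts eliminating each permutation's first entry from a work-set of still-missing vertices (breaking early once empty) and answers whether anything remains, instead of A's outer loop over vertices each rescanning auts.
import Mathlib
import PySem

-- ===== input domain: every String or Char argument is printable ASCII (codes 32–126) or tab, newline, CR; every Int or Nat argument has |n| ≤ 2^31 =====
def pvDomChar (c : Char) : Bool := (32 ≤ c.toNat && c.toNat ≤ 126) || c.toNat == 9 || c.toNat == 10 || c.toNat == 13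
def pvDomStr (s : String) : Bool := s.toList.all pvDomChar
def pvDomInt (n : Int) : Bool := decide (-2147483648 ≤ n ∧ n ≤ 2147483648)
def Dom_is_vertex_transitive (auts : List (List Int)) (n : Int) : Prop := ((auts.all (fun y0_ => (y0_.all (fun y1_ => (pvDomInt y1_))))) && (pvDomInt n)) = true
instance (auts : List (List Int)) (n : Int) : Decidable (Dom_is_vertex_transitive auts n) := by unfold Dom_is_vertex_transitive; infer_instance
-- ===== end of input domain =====

-- B inverts the traversal: after a pigeonhole short-circuit, one pass over auts
-- eliminating each first entry from a work-set of still-missing vertices (early break),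
-- instead of A's per-vertex rescans of auts (objective: alternative).

-- ===== PORT A =====
-- inner 'for perm in auts: if perm[0] == v: found = True; break'
def pvA_scan (auts : List (List Int)) (v : Int) : Bool :=
  match auts with
  | [] => false
  | perm :: rest =>
      -- perm[0]: total form pyGetD, exact under Pre_ (no empty perm)
      if PySem.List.pyGetD perm 0 0 == v then true else pvA_scan rest v

-- outer 'for v in range(1, n)' — range is LAZY in Python and A may break early,
-- so the port counts v upward instead of materializing the range
def pvA_loop (auts : List (List Int)) (v n : Int) : Bool :=
  if v < n then
    if pvA_scan auts v then pvA_loop auts (v + 1) n else false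
  else true
termination_by (n - v).toNat
decreasing_by omega

def is_vertex_transitive (auts : List (List Int)) (n : Int) : Bool :=
  pvA_loop auts 1 n

-- ===== PORT B =====
-- 'for perm in auts: if not missing: break; missing.discard(perm[0])'
def pvB_loop (auts : List (List Int)) (missing : PySem.Set Int) : PySem.Set Int :=
  match auts with
  | [] => missing
  | perm :: rest =>
      if missing.isEmpty then missing
      else pvB_loop rest (PySem.Set.discard missing (PySem.List.pyGetD perm 0 0))

def is_vertex_transitive_alt (auts : List (List Int)) (n : Int) : Bool :=
  -- pigeonhole short-circuit: each perm covers at most one vertex as perm[0]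
  if n - 1 > (auts.length : Int) then false
  else
    let missing : PySem.Set Int := PySem.Set.ofList (PySem.List.pyRange 1 n 1)
    -- 'return not missing'
    (pvB_loop auts missing).isEmpty

-- ===== PRECONDITION & SPEC =====
-- Pre_ is exactly the inputs on which Python A returns normally: perm[0] raises
-- IndexError (in both Pythons, on the same inputs) unless either no perm is empty or
-- every vertex 1..n-1 already occurs as a first entry in the prefix before the first
-- empty perm (then A returns before ever indexing an empty perm); the length bound is
-- implied by that coverage (pigeonhole) and only keeps the condition cheap to decide.
def Pre_is_vertex_transitive (auts : List (List Int)) (n : Int) : Prop :=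
  (∀ p ∈ auts, p ≠ []) ∨
  (n - 1 ≤ ((auts.takeWhile (fun p => !p.isEmpty)).length : Int) ∧
   ∀ v ∈ PySem.List.pyRange 1 n 1,
      v ∈ (auts.takeWhile (fun p => !p.isEmpty)).map (fun p => PySem.List.pyGetD p 0 0))
instance (auts : List (List Int)) (n : Int) : Decidable (Pre_is_vertex_transitive auts n) := by
  unfold Pre_is_vertex_transitive; infer_instance

def pvWitness_is_vertex_transitive : List (List Int) × Int := ([[1, 0, 2], [2, 1, 0], [0, 1, 2]], 3)

def Spec_is_vertex_transitive (auts : List (List Int)) (n : Int) (out : Bool) : Prop := out = is_vertex_transitive_alt auts n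
instance (auts : List (List Int)) (n : Int) (out : Bool) : Decidable (Spec_is_vertex_transitive auts n out) := by unfold Spec_is_vertex_transitive; infer_instance

-- ===== CLAIM =====
def Claim_equal_is_vertex_transitive : Prop := ∀ (auts : List (List Int)) (n : Int), Dom_is_vertex_transitive auts n → Pre_is_vertex_transitive auts n → Spec_is_vertex_transitive auts n (is_vertex_transitive auts n)

-- ===== LEMMAS AND PROOFS =====

theorem pvA_scan_eq_true_iff (auts : List (List Int)) (v : Int) :
    pvA_scan auts v = true ↔ v ∈ auts.map (fun perm => PySem.List.pyGetD perm 0 0) := by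
  induction auts with
  | nil => simp [pvA_scan]
  | cons p rest ih =>
      simp only [pvA_scan, List.map_cons, List.mem_cons]
      split_ifs with h
      · have hv : PySem.List.pyGetD p 0 0 = v := beq_iff_eq.mp h
        simp [hv]
      · have hne : v ≠ PySem.List.pyGetD p 0 0 := fun hh => h (by simp [hh])
        simp [ih, hne]

theorem pvA_loop_eq_all (auts : List (List Int)) (v n : Int) :
    pvA_loop auts v n = (PySem.List.pyRange v n 1).all (pvA_scan auts) := by
  fun_induction pvA_loop auts v n with
  | case1 v h hscan ih =>
      rw [PySem.List.pyRange_one_cons h, List.all_cons, hscan, ih]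
      simp
  | case2 v h hscan =>
      rw [PySem.List.pyRange_one_cons h, List.all_cons]
      simp [hscan]
  | case3 v h =>
      have hz : (n - v).toNat = 0 := by omega
      simp [PySem.List.pyRange_one, hz]

-- membership in the work-set after the pass: still in the initial set and never covered
theorem mem_pvB_loop (auts : List (List Int)) (m : PySem.Set Int) (v : Int) :
    v ∈ pvB_loop auts m ↔ v ∈ m ∧ v ∉ auts.map (fun perm => PySem.List.pyGetD perm 0 0) := by
  induction auts generalizing m with
  | nil => simp [pvB_loop]
  | cons p rest ih =>
      simp only [pvB_loop]
      split_ifs with h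
      · have hm : m = [] := List.isEmpty_iff.mp h
        simp [hm]
      · rw [ih, PySem.Set.mem_discard]
        simp only [List.map_cons, List.mem_cons]
        tauto

-- ===== VERDICT =====
theorem is_vertex_transitive_spec : Claim_equal_is_vertex_transitive := by
  intro auts n _ _
  unfold Spec_is_vertex_transitive is_vertex_transitive is_vertex_transitive_alt
  rw [pvA_loop_eq_all auts 1 n]
  split_ifs with hpig
  · -- pigeonhole: more vertices to cover than automorphisms, so some v is unfound
    rw [List.all_eq_false]
    by_contra hno
    push_neg at hno
    have hsub : PySem.List.pyRange 1 n 1 ⊆ auts.map (fun perm => PySem.List.pyGetD perm 0 0) := by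
      intro v hv
      have := hno v hv
      exact (pvA_scan_eq_true_iff auts v).mp (by simpa using this)
    have hle := (List.subperm_of_subset (PySem.List.nodup_pyRange_one 1 n) hsub).length_le
    rw [PySem.List.length_pyRange_one, List.length_map] at hle
    omega
  · rw [Bool.eq_iff_iff, List.all_eq_true, List.isEmpty_iff, List.eq_nil_iff_forall_not_mem]
    constructor
    · intro h v hv
      rw [mem_pvB_loop] at hv
      obtain ⟨hmem, hnot⟩ := hv
      have : v ∈ PySem.List.pyRange 1 n 1 := by
        simpa [PySem.Set.mem_ofList] using hmem
      exact hnot ((pvA_scan_eq_true_iff auts v).mp (h v this))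
    · intro h v hv
      rw [pvA_scan_eq_true_iff]
      by_contra hnot
      refine h v ?_
      rw [mem_pvB_loop]
      exact ⟨by simpa [PySem.Set.mem_ofList] using hv, hnot⟩
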